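-- pv_equiv track=rewrite | github.com/miliar/Code_Jam_Webscraper | solutions_python/Problem_75/399.py | get_resulting_elems_list
-- ===== SOURCE A (Python) =====
-- BASE_ELEMS = "QWERASDF"
--
-- def get_sorted_seq(el1, el2):
--     return "%s%s" %\
--         ((el1, el2) if el1 < el2 else (el2, el1))
--
-- def get_resulting_elems_list(seq, combine_rules, opposed_rules):
--
--     elems_list = []
--
--     for el in seq:
--
--         elems_list.append(el)
--
--         if (len(elems_list) < 2):
--             continue
--
--         last_pair_elems = elems_list[-2:]
--         last_pair = get_sorted_seq(last_pair_elems[0], last_pair_elems[1])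
--         if last_pair in combine_rules:
--             elems_list = elems_list[:-2] + [combine_rules[last_pair]]
--         else:
--             for pair_elem in elems_list[:-1]:
--                 if (pair_elem in BASE_ELEMS) and (get_sorted_seq(el, pair_elem) in opposed_rules):
--                     elems_list = []
--                     break
--
--     return elems_list
-- ===== SOURCE B (Python) =====
-- BASE_ELEMS = "QWERASDF"
--
-- def get_resulting_elems_list(seq, combine_rules, opposed_rules):
--     # Precompute once: for each character el, the set of stack elements that would
--     # oppose it (each opposition rule contributes at most two (el, partner) pairs,
--     # and a partner matters only if it is a substring of BASE_ELEMS).  The main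
--     # loop then keeps a count dict of the stack's contents, so each step checks
--     # only partners[el] instead of rescanning the whole stack against every rule.
--     partners = {}
--     for r in opposed_rules:
--         if not r:
--             continue
--         e, p = r[0], r[1:]
--         if e < p and p in BASE_ELEMS:
--             partners.setdefault(e, set()).add(p)
--         e, p = r[-1], r[:-1]
--         if not (e < p) and p in BASE_ELEMS:
--             partners.setdefault(e, set()).add(p)
--
--     stack = []
--     counts = {}
--     for el in seq:
--         if stack:
--             prev = stack[-1]
--             pair = el + prev if el < prev else prev + el
--             if pair in combine_rules:
--                 counts[prev] -= 1
--                 c = combine_rules[pair]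
--                 stack[-1] = c
--                 counts[c] = counts.get(c, 0) + 1
--                 continue
--             if any(counts.get(p, 0) > 0 for p in partners.get(el, ())):
--                 stack = []
--                 counts = {}
--                 continue
--         stack.append(el)
--         counts[el] = counts.get(el, 0) + 1
--     return stack
-- ===== Notes on version B (the rewrite author's own statement) =====
-- stated objective: faster
-- what changed: B precomputes once, from opposed_rules, a dict mapping each character to the set of stack elements that would oppose it (each rule contributes at most two pairs, kept only when the partner is a substring of BASE_ELEMS), and maintains a count dict of the stack's contents, so each step does O(1)-sized lookups instead of A's rescan of the whole stack with a list-membership test per element.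
import Mathlib
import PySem

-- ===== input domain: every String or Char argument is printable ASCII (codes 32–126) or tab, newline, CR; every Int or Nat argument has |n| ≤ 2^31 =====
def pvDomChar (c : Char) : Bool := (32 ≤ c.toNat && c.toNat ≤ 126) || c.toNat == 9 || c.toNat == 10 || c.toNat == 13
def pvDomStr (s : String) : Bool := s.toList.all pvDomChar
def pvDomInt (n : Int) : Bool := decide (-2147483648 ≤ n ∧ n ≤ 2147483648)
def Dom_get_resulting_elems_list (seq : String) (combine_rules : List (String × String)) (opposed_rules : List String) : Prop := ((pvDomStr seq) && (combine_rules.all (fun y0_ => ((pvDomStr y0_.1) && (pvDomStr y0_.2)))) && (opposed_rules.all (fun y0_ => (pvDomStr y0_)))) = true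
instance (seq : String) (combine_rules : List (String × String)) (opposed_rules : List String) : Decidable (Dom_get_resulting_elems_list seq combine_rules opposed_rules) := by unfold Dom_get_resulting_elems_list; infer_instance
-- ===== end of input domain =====

-- B replaces A's rescans of the whole stack (the O(stack) opposition loop per character)
-- by a count dictionary of the stack's contents, checking only the ≤ 2 candidate partners
-- each opposition rule admits for the current character: objective = faster (asymptotic).

-- ===== PORT A =====
-- BASE_ELEMS (module constant, shared by both Pythons)
def pvBASE : String := "QWERASDF"

-- the Python parameter combine_rules is a dict built from the pairs (later duplicate key wins);
-- both ports decode it the same way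
def pvDictOf (l : List (String × String)) : PySem.Dict String String :=
  l.foldl (fun d p => d.insert p.1 p.2) PySem.Dict.empty

-- get_sorted_seq (helper of A)
def pvSortedSeq (el1 el2 : String) : String :=
  if el1 < el2 then el1 ++ el2 else el2 ++ el1

-- the body of A's `for el in seq` loop
def pvAStep (d : PySem.Dict String String) (opposed_rules : List String)
    (elems : List String) (el : Char) : List String :=
  let elems := elems ++ [String.singleton el]
  if elems.length < 2 then elems
  else
    let lp := PySem.List.slice elems (some (-2)) none
    let pair := pvSortedSeq (PySem.List.pyGetD lp 0 "") (PySem.List.pyGetD lp 1 "")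
    if d.contains pair then
      PySem.List.slice elems none (some (-2)) ++ [d.getD pair ""]
    else
      -- `for pair_elem in elems_list[:-1]: if …: elems_list = []; break`
      if (PySem.List.slice elems none (some (-1))).any
          (fun p => PySem.Str.isIn p pvBASE &&
                    opposed_rules.contains (pvSortedSeq (String.singleton el) p)) then
        []
      else elems

def get_resulting_elems_list (seq : String) (combine_rules : List (String × String)) (opposed_rules : List String) : List String :=
  seq.toList.foldl (pvAStep (pvDictOf combine_rules) opposed_rules) []

-- ===== PORT B =====
-- Source B's preprocessing: one rule's contribution to the partners dict
-- (partners.setdefault(e, set()).add(p) for each of the rule's ≤ 2 (e, p) pairs)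
def pvPStep (d : PySem.Dict Char (PySem.Set String)) (r : String) :
    PySem.Dict Char (PySem.Set String) :=
  match r.toList with
  | [] => d
  | c :: rest =>
    let p1 := String.ofList rest
    let d1 := if String.singleton c < p1 ∧ PySem.Str.isIn p1 pvBASE then
        d.modify c PySem.Set.empty (fun s => PySem.Set.add s p1) else d
    let e2 := (c :: rest).getLast (by simp)
    let p2 := String.ofList ((c :: rest).dropLast)
    if ¬ String.singleton e2 < p2 ∧ PySem.Str.isIn p2 pvBASE then
      d1.modify e2 PySem.Set.empty (fun s => PySem.Set.add s p2) else d1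

-- Source B's `partners` dict: char el ↦ set of stack elements opposing el
def pvPartners (opposed_rules : List String) : PySem.Dict Char (PySem.Set String) :=
  opposed_rules.foldl pvPStep PySem.Dict.empty

-- the body of Source B's main loop; state = (stack, counts of the stack's contents)
def pvBStep (d : PySem.Dict String String) (pd : PySem.Dict Char (PySem.Set String))
    (st : List String × PySem.Dict String Int) (el : Char) :
    List String × PySem.Dict String Int :=
  match st.1.getLast? with
  | some prev =>
    let elS := String.singleton el
    let pair := if elS < prev then elS ++ prev else prev ++ elS
    if d.contains pair then
      let c := d.getD pair ""
      (st.1.dropLast ++ [c], (st.2.modify prev 0 (· - 1)).modify c 0 (· + 1))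
    else if (pd.getD el PySem.Set.empty).any
        (fun p => decide (0 < st.2.getD p 0)) then
      ([], PySem.Dict.empty)
    else
      (st.1 ++ [elS], st.2.modify elS 0 (· + 1))
  | none =>
    (st.1 ++ [String.singleton el], st.2.modify (String.singleton el) 0 (· + 1))

def get_resulting_elems_list_alt (seq : String) (combine_rules : List (String × String)) (opposed_rules : List String) : List String :=
  (seq.toList.foldl (pvBStep (pvDictOf combine_rules) (pvPartners opposed_rules))
    ([], PySem.Dict.empty)).1

-- ===== PRECONDITION & SPEC =====
def Spec_get_resulting_elems_list (seq : String) (combine_rules : List (String × String)) (opposed_rules : List String) (out : List String) : Prop := out = get_resulting_elems_list_alt seq combine_rules opposed_rules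
instance (seq : String) (combine_rules : List (String × String)) (opposed_rules : List String) (out : List String) : Decidable (Spec_get_resulting_elems_list seq combine_rules opposed_rules out) := by unfold Spec_get_resulting_elems_list; infer_instance

-- ===== CLAIM (what is proved, stated in full; the proofs are below) =====
def Claim_equal_get_resulting_elems_list : Prop := ∀ (seq : String) (combine_rules : List (String × String)) (opposed_rules : List String), Dom_get_resulting_elems_list seq combine_rules opposed_rules → Spec_get_resulting_elems_list seq combine_rules opposed_rules (get_resulting_elems_list seq combine_rules opposed_rules)

-- ===== LEMMAS AND PROOFS =====

-- the stack elements p that combine with el into exactly the string r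
def pvCands (el : Char) (r : String) : List String :=
  (if r.toList.head? = some el ∧ String.singleton el < String.ofList (r.toList.drop 1)
   then [String.ofList (r.toList.drop 1)] else []) ++
  (if r.toList.getLast? = some el ∧ ¬ String.singleton el < String.ofList (r.toList.dropLast)
   then [String.ofList (r.toList.dropLast)] else [])

-- counts is exactly the multiset of the stack's contents
def pvInv (stack : List String) (counts : PySem.Dict String Int) : Prop :=
  ∀ q : String, counts.getD q 0 = (stack.count q : Int)

-- getD after modify, pointwise
theorem pv_getD_modify {κ ν : Type} [BEq κ] [LawfulBEq κ] [DecidableEq κ] (c : PySem.Dict κ ν)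
    (k q : κ) (d0 : ν) (f : ν → ν) :
    (c.modify k d0 f).getD q d0 = if q = k then f (c.getD k d0) else c.getD q d0 := by
  by_cases h : q = k
  · subst h; rw [if_pos rfl]; exact PySem.Dict.getD_modify_self c q d0 f
  · rw [if_neg h]; exact PySem.Dict.getD_modify_of_ne c d0 f h

theorem pv_slice_neg_one {α : Type} (xs : List α) :
    PySem.List.slice xs none (some (-1)) = xs.dropLast := by
  simp only [PySem.List.slice, PySem.List.clampIdx]
  rcases xs with _ | ⟨a, t⟩
  · simp
  · simp only [List.length_cons]
    rw [List.dropLast_eq_take]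
    split_ifs with h1 h2 <;> simp_all
    omega

theorem pv_slice_neg_two {α : Type} (xs : List α) :
    PySem.List.slice xs none (some (-2)) = xs.take (xs.length - 2) := by
  simp only [PySem.List.slice, PySem.List.clampIdx]
  split_ifs with h1 h2
  · simp_all; omega
  · simp only [List.drop_zero]; congr 1; omega
  · simp_all

theorem pv_slice_from_neg_two {α : Type} (xs : List α) (h : 2 ≤ xs.length) :
    PySem.List.slice xs (some (-2)) none = xs.drop (xs.length - 2) := by
  simp only [PySem.List.slice, PySem.List.clampIdx]
  split_ifs with h1 h2
  · simp_all; omega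
  · rw [List.take_of_length_le (by simp)]
    congr 1; omega
  · simp_all

theorem pv_sorted_comm (a b : String) :
    pvSortedSeq a b = if b < a then b ++ a else a ++ b := by
  unfold pvSortedSeq
  rcases lt_trichotomy a b with h | h | h
  · rw [if_pos h, if_neg (not_lt_of_gt h)]
  · subst h; simp
  · rw [if_neg (not_lt_of_gt h), if_pos h]

theorem pv_cands_iff (el : Char) (p r : String) :
    pvSortedSeq (String.singleton el) p = r ↔ p ∈ pvCands el r := by
  unfold pvSortedSeq pvCands
  constructor
  · intro h
    by_cases hlt : String.singleton el < p
    · rw [if_pos hlt] at h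
      subst h
      simp only [List.mem_append, List.mem_ite_nil_right]
      left
      have ht : (String.singleton el ++ p).toList = el :: p.toList := by simp
      refine ⟨⟨?_, ?_⟩, ?_⟩ <;> simp [ht, hlt]
    · rw [if_neg hlt] at h
      subst h
      simp only [List.mem_append, List.mem_ite_nil_right]
      right
      have ht : (p ++ String.singleton el).toList = p.toList ++ [el] := by simp
      refine ⟨⟨?_, ?_⟩, ?_⟩ <;> simp [ht, hlt]
  · intro h
    simp only [List.mem_append, List.mem_ite_nil_right, List.mem_singleton] at h
    rcases h with ⟨⟨h1, h2⟩, h3⟩ | ⟨⟨h1, h2⟩, h3⟩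
    · subst h3
      rw [if_pos h2]
      apply String.toList_inj.mp
      simp only [String.toList_append, String.toList_singleton, String.toList_ofList]
      obtain ⟨ys, hys⟩ := List.head?_eq_some_iff.mp h1
      rw [hys]; simp
    · subst h3
      rw [if_neg h2]
      apply String.toList_inj.mp
      simp only [String.toList_append, String.toList_singleton, String.toList_ofList]
      exact List.dropLast_append_getLast? el h1

theorem pv_count_concat (l : List String) (x q : String) :
    (((l ++ [x]).count q : Nat) : Int)
      = (l.count q : Int) + (if q = x then 1 else 0) := by
  rw [List.count_append, List.count_singleton]
  by_cases h : q = x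
  · subst h; rw [if_pos rfl, if_pos (by simp)]; push_cast; ring
  · rw [if_neg h, if_neg (by simp [Ne.symm h]), add_zero]; push_cast
    ring

theorem pv_inv_push (s : List String) (c : PySem.Dict String Int) (x : String)
    (hinv : pvInv s c) : pvInv (s ++ [x]) (c.modify x 0 (· + 1)) := by
  intro q
  rw [pv_getD_modify, pv_count_concat, hinv q]
  by_cases h : q = x
  · subst h; rw [if_pos rfl, if_pos rfl, hinv q]
  · rw [if_neg h, if_neg h, add_zero]

-- membership in pvCands, spelled out
theorem pv_mem_cands (e : Char) (r p : String) :
    p ∈ pvCands e r ↔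
      (r.toList.head? = some e ∧
        String.singleton e < String.ofList (r.toList.drop 1) ∧
        p = String.ofList (r.toList.drop 1)) ∨
      (r.toList.getLast? = some e ∧
        ¬ String.singleton e < String.ofList (r.toList.dropLast) ∧
        p = String.ofList (r.toList.dropLast)) := by
  unfold pvCands
  simp [List.mem_ite_nil_right, and_assoc]

-- membership after Source B's `partners.setdefault(k, set()).add(v)` guarded by a condition
theorem pv_mem_condadd (d : PySem.Dict Char (PySem.Set String)) (cond : Prop)
    [Decidable cond] (k e : Char) (v p : String) :
    p ∈ (if cond then d.modify k PySem.Set.empty (fun s => PySem.Set.add s v)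
          else d).getD e PySem.Set.empty ↔
      p ∈ d.getD e PySem.Set.empty ∨ (cond ∧ k = e ∧ p = v) := by
  split_ifs with h
  · rw [pv_getD_modify]
    by_cases he : e = k
    · rw [if_pos he, PySem.Set.mem_add, he]
      constructor
      · rintro (hm | rfl)
        · exact Or.inl hm
        · exact Or.inr ⟨h, rfl, rfl⟩
      · rintro (hm | ⟨_, _, rfl⟩)
        · exact Or.inl hm
        · exact Or.inr rfl
    · rw [if_neg he]
      constructor
      · exact Or.inl
      · rintro (hm | ⟨_, hk, _⟩)
        · exact hm
        · exact absurd hk.symm he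
  · simp [h]

-- what one preprocessing step contributes at key e
theorem pv_mem_pstep (d : PySem.Dict Char (PySem.Set String)) (r : String)
    (e : Char) (p : String) :
    p ∈ (pvPStep d r).getD e PySem.Set.empty ↔
      p ∈ d.getD e PySem.Set.empty ∨
        (p ∈ pvCands e r ∧ PySem.Str.isIn p pvBASE = true) := by
  rcases hr : r.toList with _ | ⟨c, rest⟩
  · unfold pvPStep
    rw [hr]
    simp [pv_mem_cands, hr]
  · unfold pvPStep
    rw [hr]
    simp only [pv_mem_cands, hr, List.head?_cons,
      List.getLast?_eq_some_getLast (l := c :: rest) (by simp), Option.some_inj,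
      List.drop_succ_cons, List.drop_zero]
    rw [pv_mem_condadd, pv_mem_condadd]
    constructor
    · rintro ((h | ⟨⟨hlt, hb⟩, hce, rfl⟩) | ⟨⟨hlt, hb⟩, hee, rfl⟩)
      · exact Or.inl h
      · exact Or.inr ⟨Or.inl ⟨hce, by rw [← hce]; exact hlt, rfl⟩, hb⟩
      · exact Or.inr ⟨Or.inr ⟨hee, by rw [← hee]; exact hlt, rfl⟩, hb⟩
    · rintro (h | ⟨(⟨hce, hlt, rfl⟩ | ⟨hee, hlt, rfl⟩), hb⟩)
      · exact Or.inl (Or.inl h)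
      · exact Or.inl (Or.inr ⟨⟨by rw [hce]; exact hlt, hb⟩, hce, rfl⟩)
      · exact Or.inr ⟨⟨by rw [hee]; exact hlt, hb⟩, hee, rfl⟩

-- the partners dict collects exactly the candidates over all rules
theorem pv_mem_partners (opposed : List String) (e : Char) (p : String) :
    p ∈ (pvPartners opposed).getD e PySem.Set.empty ↔
      ∃ r ∈ opposed, p ∈ pvCands e r ∧ PySem.Str.isIn p pvBASE = true := by
  have key : ∀ (l : List String) (d : PySem.Dict Char (PySem.Set String)),
      p ∈ (l.foldl pvPStep d).getD e PySem.Set.empty ↔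
        p ∈ d.getD e PySem.Set.empty ∨
          ∃ r ∈ l, p ∈ pvCands e r ∧ PySem.Str.isIn p pvBASE = true := by
    intro l
    induction l with
    | nil => simp
    | cons x t ih =>
      intro d
      rw [List.foldl_cons, ih, pv_mem_pstep]
      simp only [List.mem_cons]
      constructor
      · rintro ((h | h) | ⟨r, hr, h⟩)
        · exact Or.inl h
        · exact Or.inr ⟨x, Or.inl rfl, h⟩
        · exact Or.inr ⟨r, Or.inr hr, h⟩
      · rintro (h | ⟨r, (rfl | hr), h⟩)
        · exact Or.inl (Or.inl h)
        · exact Or.inl (Or.inr h)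
        · exact Or.inr ⟨r, hr, h⟩
  rw [pvPartners, key]
  simp [PySem.Dict.getD, PySem.Dict.get?, PySem.Dict.empty]

-- the two opposition checks agree when counts matches the stack
theorem pv_opposed_eq (el : Char) (s : List String) (c : PySem.Dict String Int)
    (opposed : List String) (hinv : pvInv s c) :
    s.any (fun p => PySem.Str.isIn p pvBASE &&
            opposed.contains (pvSortedSeq (String.singleton el) p))
    = ((pvPartners opposed).getD el PySem.Set.empty).any
        (fun p => decide (0 < c.getD p 0)) := by
  have hmem : ∀ p : String, (0 < c.getD p 0) ↔ p ∈ s := by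
    intro p; rw [hinv p]
    exact_mod_cast Int.natCast_pos.trans List.count_pos_iff
  rw [Bool.eq_iff_iff]
  simp only [List.any_eq_true, Bool.and_eq_true, decide_eq_true_eq,
    List.contains_iff_mem, hmem, pv_mem_partners]
  constructor
  · rintro ⟨p, hp, hb, hr⟩
    exact ⟨p, ⟨_, hr, (pv_cands_iff el p _).mp rfl, hb⟩, hp⟩
  · rintro ⟨p, ⟨r, hr, hc, hb⟩, hp⟩
    exact ⟨p, hp, hb, ((pv_cands_iff el p r).mpr hc) ▸ hr⟩

theorem pv_step (d : PySem.Dict String String) (opposed : List String)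
    (s : List String) (c : PySem.Dict String Int) (el : Char) (hinv : pvInv s c) :
    (pvBStep d (pvPartners opposed) (s, c) el).1 = pvAStep d opposed s el ∧
    pvInv (pvBStep d (pvPartners opposed) (s, c) el).1 (pvBStep d (pvPartners opposed) (s, c) el).2 := by
  rcases hlast : s.getLast? with _ | prev
  · -- empty stack: both just push
    rw [List.getLast?_eq_none_iff] at hlast
    subst hlast
    refine ⟨rfl, ?_⟩
    simpa [pvBStep] using pv_inv_push [] c (String.singleton el) hinv
  · -- non-empty stack
    have hs : s.dropLast ++ [prev] = s := List.dropLast_append_getLast? prev hlast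
    have hlen : s.length = s.dropLast.length + 1 := by
      conv_lhs => rw [← hs]
      simp
    set elS := String.singleton el with helS
    have helems : s ++ [elS] = s.dropLast ++ [prev, elS] := by
      rw [← hs]; simp
    have hlen2 : (s ++ [elS]).length = s.dropLast.length + 2 := by
      simp only [List.length_append, List.length_cons, List.length_nil]
      omega
    have hlp : PySem.List.slice (s ++ [elS]) (some (-2)) none = [prev, elS] := by
      rw [pv_slice_from_neg_two _ (by omega), hlen2, Nat.add_sub_cancel, helems,
        List.drop_left]
    have hpair : pvSortedSeq (PySem.List.pyGetD [prev, elS] 0 "")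
        (PySem.List.pyGetD [prev, elS] 1 "")
        = (if elS < prev then elS ++ prev else prev ++ elS) := by
      have h0 : PySem.List.pyGetD [prev, elS] 0 "" = prev := by
        simp [PySem.List.pyGetD, PySem.List.pyGet?, PySem.List.pyIdx?]
      have h1 : PySem.List.pyGetD [prev, elS] 1 "" = elS := by
        simp [PySem.List.pyGetD, PySem.List.pyGet?, PySem.List.pyIdx?]
      rw [h0, h1, pv_sorted_comm]
    have hdl : s.dropLast.length = s.length - 1 := by omega
    have htake : (s ++ [elS]).take s.dropLast.length = s.dropLast := by
      rw [hdl, List.take_append_of_le_length (by omega), ← List.dropLast_eq_take]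
    have hA : pvAStep d opposed s el =
        (if d.contains (if elS < prev then elS ++ prev else prev ++ elS) then
           s.dropLast ++ [d.getD (if elS < prev then elS ++ prev else prev ++ elS) ""]
         else if s.any (fun p => PySem.Str.isIn p pvBASE &&
                opposed.contains (pvSortedSeq elS p)) then []
         else s ++ [elS]) := by
      unfold pvAStep
      rw [if_neg (by rw [hlen2]; omega)]
      simp only [← helS]
      simp only [hlp, hpair, pv_slice_neg_two, pv_slice_neg_one, hlen2,
        Nat.add_sub_cancel, htake, List.dropLast_concat]
    have hB : pvBStep d (pvPartners opposed) (s, c) el =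
        (if d.contains (if elS < prev then elS ++ prev else prev ++ elS) then
           (s.dropLast ++ [d.getD (if elS < prev then elS ++ prev else prev ++ elS) ""],
            (c.modify prev 0 (· - 1)).modify
              (d.getD (if elS < prev then elS ++ prev else prev ++ elS) "") 0 (· + 1))
         else if ((pvPartners opposed).getD el PySem.Set.empty).any
                (fun p => decide (0 < c.getD p 0)) then
           ([], PySem.Dict.empty)
         else (s ++ [elS], c.modify elS 0 (· + 1))) := by
      unfold pvBStep
      rw [hlast]
    rw [hA, hB]
    by_cases hcomb : d.contains (if elS < prev then elS ++ prev else prev ++ elS)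
    · rw [if_pos hcomb, if_pos hcomb]
      refine ⟨rfl, ?_⟩
      intro q
      set cc := d.getD (if elS < prev then elS ++ prev else prev ++ elS) "" with hcc
      have hgen : ((c.modify prev 0 (· - 1)).modify cc 0 (· + 1)).getD q 0
          = c.getD q 0 - (if q = prev then 1 else 0) + (if q = cc then 1 else 0) := by
        simp only [pv_getD_modify]
        by_cases h1 : q = cc
        · by_cases h2 : cc = prev
          · simp [h1, h2]; try ring
          · have h3 : ¬ q = prev := fun h => h2 (h1.symm.trans h)
            simp [h1, h2, h3]; try ring
        · by_cases h3 : q = prev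
          · have h1' : ¬ prev = cc := fun h => h1 (h3.trans h)
            have h2 : ¬ cc = prev := fun h => h1' h.symm
            simp [h3, h1', h2]; try ring
          · simp [h1, h3]; try ring
      have hsq : (s.count q : Int)
          = (s.dropLast.count q : Int) + (if q = prev then 1 else 0) := by
        conv_lhs => rw [← hs]
        exact pv_count_concat _ _ _
      rw [hgen, pv_count_concat, hinv q, hsq]
      ring
    · rw [if_neg hcomb, if_neg hcomb, pv_opposed_eq el s c opposed hinv]
      by_cases hop : ((pvPartners opposed).getD el PySem.Set.empty).any
          (fun p => decide (0 < c.getD p 0)) = true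
      · rw [if_pos hop, if_pos hop]
        exact ⟨rfl, fun q => by
          simp [PySem.Dict.getD, PySem.Dict.get?, PySem.Dict.empty]⟩
      · rw [if_neg hop, if_neg hop]
        exact ⟨rfl, pv_inv_push s c elS hinv⟩

theorem pv_fold (d : PySem.Dict String String) (opposed : List String)
    (l : List Char) (s : List String) (c : PySem.Dict String Int) (hinv : pvInv s c) :
    (l.foldl (pvBStep d (pvPartners opposed)) (s, c)).1 = l.foldl (pvAStep d opposed) s := by
  induction l generalizing s c with
  | nil => rfl
  | cons x t ih =>
    obtain ⟨h1, h2⟩ := pv_step d opposed s c x hinv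
    simpa [List.foldl_cons, ← h1] using ih _ _ h2

-- ===== VERDICT (by name: the statement is the Claim_ definition above) =====
theorem get_resulting_elems_list_spec : Claim_equal_get_resulting_elems_list := by
  intro seq cr op _
  unfold Spec_get_resulting_elems_list get_resulting_elems_list get_resulting_elems_list_alt
  exact (pv_fold (pvDictOf cr) op seq.toList [] PySem.Dict.empty
    (fun q => by simp [PySem.Dict.empty, PySem.Dict.getD, PySem.Dict.get?])).symm
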